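-- pv_equiv track=rewrite | github.com/NycolasR/Atividade-Xadrez | alcance_da_rainha.py | marque_atacadas
-- ===== SOURCE A (Python) =====
-- def marque_atacadas(tab):
--     '''
--     (matriz) -> matriz(lista de linhas)
--     Identifica as coordenadas da posição da rainha e dos pontos
--     de origem das diagonais e demarca as posições para as quais
--     a rainha pode se mover com um 'x'.
--     '''
--
--     i_queen, j_queen = selecionar_coordenadas_rainha(tab)
--     i_diag_desc, j_diag_desc, i_diag_asce, j_diag_asce = selecionar_coordenadas_diagonais(tab)
--
--     # adiciona a marcação nas linhas vertical e horizontal para as quais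
--     # a rainha pode se mover
--     for i in range(len(tab)):
--         for j in range(len(tab[0])):
--             if (i == i_queen or j == j_queen):
--                 tab = adicionar_marcacao(i, j, tab)
--
--     # adiciona a marcação na linha diagonal decrescente na qual
--     # a rainha pode se mover
--     while i_diag_desc < len(tab) and j_diag_desc < len(tab[0]):
--         tab = adicionar_marcacao(i_diag_desc, j_diag_desc, tab)
--         i_diag_desc += 1
--         j_diag_desc += 1
--
--     # adiciona a marcação na linha diagonal ascendente na qual
--     # a rainha pode se mover
--     while i_diag_asce >= 0 and j_diag_asce < len(tab[0]):
--         tab = adicionar_marcacao(i_diag_asce, j_diag_asce, tab)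
--         i_diag_asce -= 1
--         j_diag_asce += 1
--
--     return tab
--
-- def adicionar_marcacao(i, j, tab):
--     '''
--     (int, int, matriz) -> matriz(lista de linhas)
--     Função usada para marcar com um 'x' na matriz
--     na posição das coordenadas (i, j) passadas por parâmetro.
--     '''
--
--     if (tab[i][j]).strip() != 'R':
--         tab[i][j] = 'x'.center(5)
--
--     return tab
--
-- def selecionar_coordenadas_rainha(tab):
--     '''
--     (matriz) -> int, int
--     Retorna as coordenadas (i, j) da rainha na
--     matriz do tabuleiro.
--     '''
--
--     i_queen = j_queen = 0
--
--     for i in range(len(tab)):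
--         for j in range(len(tab[0])):
--             if (tab[i][j]).strip() == 'R':
--                 i_queen, j_queen = i, j
--     return i_queen, j_queen
--
-- def selecionar_coordenadas_diagonais(tab):
--     '''
--     (matriz) -> int, int, int, int
--     Com base nas coordenadas da rainha,
--     serão retornadas as coordenadas de origem das
--     diagonais descrescente e crescente, respectivamente
--     (i, j), (i, j).
--     '''
--
--     i_queen, j_queen = selecionar_coordenadas_rainha(tab)
--
--     #diagonal descendente
--     i_diag_desc = j_diag_desc = 0
--     while i_queen > 0 and j_queen > 0 :
--         i_queen -= 1
--         j_queen -= 1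
--
--     #atribuindo coordenadas
--     i_diag_desc, j_diag_desc = i_queen, j_queen
--
--
--     i_queen, j_queen = selecionar_coordenadas_rainha(tab)
--
--     #diagonal ascendente
--     i_diag_asce = j_diag_asce = 0
--     while i_queen < len(tab)-1 and j_queen > 0:
--         i_queen += 1
--         j_queen -= 1
--
--     #atribuindo coordenadas
--     i_diag_asce, j_diag_asce = i_queen, j_queen
--
--     return i_diag_desc, j_diag_desc, i_diag_asce, j_diag_asce
-- ===== SOURCE B (Python) =====
-- def marque_atacadas(tab):
--     '''
--     (matriz) -> matriz(lista de linhas)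
--     Marks with 'x' every square the queen attacks, touching only her
--     row, column and the two diagonals instead of scanning the board.
--     (Mutates tab in place, like the original.)
--     '''
--     rows, cols = len(tab), len(tab[0])
--
--     # locate the queen (last 'R' in row-major order)
--     qi = qj = 0
--     for i in range(rows):
--         for j in range(cols):
--             if tab[i][j].strip() == 'R':
--                 qi, qj = i, j
--
--     if cols == 0:
--         return tab
--
--     # queen's row
--     for c in range(cols):
--         _marcar(qi, c, tab)
--     # queen's column
--     for r in range(rows):
--         _marcar(r, qj, tab)
--     # both diagonals: one candidate column per row on each
--     for r in range(rows):
--         for c in (r + qj - qi, qi + qj - r):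
--             if 0 <= c < cols:
--                 _marcar(r, c, tab)
--     return tab
--
--
-- def _marcar(i, j, tab):
--     if tab[i][j].strip() != 'R':
--         tab[i][j] = '  x  '
-- ===== Notes on version B (the rewrite author's own statement) =====
-- stated objective: faster
-- what changed: B still scans the board once to locate the queen, but then writes marks only along the queen's row, column and two diagonals (O(rows+cols) marking writes) instead of A's full-grid marking double loop plus two diagonal walks from computed origin cells.
import Mathlib
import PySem

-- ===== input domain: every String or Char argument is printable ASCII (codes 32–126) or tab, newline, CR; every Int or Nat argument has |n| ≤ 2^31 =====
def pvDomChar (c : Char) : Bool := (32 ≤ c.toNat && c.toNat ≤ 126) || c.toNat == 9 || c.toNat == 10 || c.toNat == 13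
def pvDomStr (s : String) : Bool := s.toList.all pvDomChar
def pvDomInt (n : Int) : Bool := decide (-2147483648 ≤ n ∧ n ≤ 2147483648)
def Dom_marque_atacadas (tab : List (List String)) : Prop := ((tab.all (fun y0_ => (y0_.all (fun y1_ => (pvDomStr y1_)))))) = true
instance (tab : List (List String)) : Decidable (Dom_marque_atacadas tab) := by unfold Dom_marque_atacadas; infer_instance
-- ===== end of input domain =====

-- B marks only the queen's row, column and two diagonals (O(rows+cols) cell
-- writes) instead of A's full-board marking scan; both still scan the board
-- once to find the queen.  Python A and B mutate `tab` in place; the ports and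
-- the equivalence below are about the returned value (which is the same list).

-- ===== PORT A =====
-- 'x'.center(5) = "  x  " (written as the literal).  Cell reads tab[i][j] are
-- in range on Pre_ inputs, so getD is exact there.
def adicionar_marcacao (i j : Nat) (tab : List (List String)) : List (List String) :=
  if PySem.Str.strip ((tab.getD i []).getD j "") ≠ "R" then
    tab.set i ((tab.getD i []).set j "  x  ")
  else tab

def selecionar_coordenadas_rainha (tab : List (List String)) : Nat × Nat :=
  (List.range tab.length).foldl (fun st i =>
    (List.range (tab.headD []).length).foldl (fun st j =>
      if PySem.Str.strip ((tab.getD i []).getD j "") = "R" then (i, j) else st) st)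
    (0, 0)

-- the two origin-finding while loops of selecionar_coordenadas_diagonais
def diagDescOrigin (i j : Nat) : Nat × Nat :=
  if i > 0 ∧ j > 0 then diagDescOrigin (i - 1) (j - 1) else (i, j)
termination_by i
decreasing_by omega

def diagAsceOrigin (rows i j : Nat) : Nat × Nat :=
  if i < rows - 1 ∧ j > 0 then diagAsceOrigin rows (i + 1) (j - 1) else (i, j)
termination_by j
decreasing_by omega

def selecionar_coordenadas_diagonais (tab : List (List String)) : Nat × Nat × Nat × Nat :=
  let q := selecionar_coordenadas_rainha tab
  let d := diagDescOrigin q.1 q.2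
  let a := diagAsceOrigin tab.length q.1 q.2
  (d.1, d.2, a.1, a.2)

-- the 'while i_diag_desc < len(tab) and j_diag_desc < len(tab[0])' loop
-- (rows/cols are loop invariants: assignment never changes any length)
def descLoop (rows cols i j : Nat) (tab : List (List String)) : List (List String) :=
  if i < rows ∧ j < cols then descLoop rows cols (i + 1) (j + 1) (adicionar_marcacao i j tab)
  else tab
termination_by rows - i
decreasing_by omega

-- the 'while i_diag_asce >= 0 and j_diag_asce < len(tab[0])' loop (i goes to -1)
def asceLoop (rows cols : Nat) (i : Int) (j : Nat) (tab : List (List String)) : List (List String) :=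
  if 0 ≤ i ∧ j < cols then asceLoop rows cols (i - 1) (j + 1) (adicionar_marcacao i.toNat j tab)
  else tab
termination_by cols - j
decreasing_by omega

def marque_atacadas (tab : List (List String)) : List (List String) :=
  let rows := tab.length
  let cols := (tab.headD []).length   -- len(tab[0]); Pre_ excludes the empty board
  let q := selecionar_coordenadas_rainha tab
  let d := selecionar_coordenadas_diagonais tab
  let tab1 := (List.range rows).foldl (fun t i =>
    (List.range cols).foldl (fun t j =>
      if i = q.1 ∨ j = q.2 then adicionar_marcacao i j t else t) t) tab
  let tab2 := descLoop rows cols d.1 d.2.1 tab1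
  asceLoop rows cols (d.2.2.1 : Int) d.2.2.2 tab2

-- ===== PORT B =====
def marcarB (i j : Nat) (tab : List (List String)) : List (List String) :=
  if PySem.Str.strip ((tab.getD i []).getD j "") ≠ "R" then
    tab.set i ((tab.getD i []).set j "  x  ")
  else tab

def findQueenB (tab : List (List String)) : Nat × Nat :=
  (List.range tab.length).foldl (fun st i =>
    (List.range (tab.headD []).length).foldl (fun st j =>
      if PySem.Str.strip ((tab.getD i []).getD j "") = "R" then (i, j) else st) st)
    (0, 0)

def marque_atacadas_alt (tab : List (List String)) : List (List String) :=
  let rows := tab.length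
  let cols := (tab.headD []).length
  let q := findQueenB tab
  if cols = 0 then tab
  else
    let t1 := (List.range cols).foldl (fun t c => marcarB q.1 c t) tab
    let t2 := (List.range rows).foldl (fun t r => marcarB r q.2 t) t1
    (List.range rows).foldl (fun (t : List (List String)) (r : Nat) =>
      let c1 : Int := (r : Int) + q.2 - q.1
      let t' := if 0 ≤ c1 ∧ c1 < (cols : Int) then marcarB r c1.toNat t else t
      let c2 : Int := (q.1 : Int) + q.2 - r
      if 0 ≤ c2 ∧ c2 < (cols : Int) then marcarB r c2.toNat t' else t') t2

-- ===== PRECONDITION & SPEC =====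
-- Pre_: exactly the inputs where Python A returns: a nonempty board whose rows
-- all have at least len(tab[0]) entries (otherwise tab[0] or tab[i][j] raises
-- IndexError).
def Pre_marque_atacadas (tab : List (List String)) : Prop :=
  tab ≠ [] ∧ ∀ row ∈ tab, (tab.headD []).length ≤ row.length

instance (tab : List (List String)) : Decidable (Pre_marque_atacadas tab) := by
  unfold Pre_marque_atacadas; infer_instance

def pvWitness_marque_atacadas : List (List String) :=
  [["  .  ", "  .  ", "  .  "], ["  .  ", "  R  ", "  .  "], ["  .  ", "  .  ", "  .  "]]

def Spec_marque_atacadas (tab : List (List String)) (out : List (List String)) : Prop :=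
  out = marque_atacadas_alt tab
instance (tab : List (List String)) (out : List (List String)) : Decidable (Spec_marque_atacadas tab out) := by
  unfold Spec_marque_atacadas; infer_instance

-- ===== CLAIM (what is proved, stated in full; the proofs are below) =====
def Claim_equal_marque_atacadas : Prop := ∀ (tab : List (List String)), Dom_marque_atacadas tab → Pre_marque_atacadas tab → Spec_marque_atacadas tab (marque_atacadas tab)

-- ===== LEMMAS AND PROOFS =====

-- entry (r,c) of the board, "" out of range
def ent (tab : List (List String)) (r c : Nat) : String := (tab.getD r []).getD c ""

-- tab is orig with exactly the cells in mask M marked (queen cells never overwritten)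
def MRep (orig : List (List String)) (M : Nat → Nat → Bool) (tab : List (List String)) : Prop :=
  tab.length = orig.length ∧
  (∀ r, (tab.getD r []).length = (orig.getD r []).length) ∧
  ∀ r c, ent tab r c =
    if M r c = true ∧ PySem.Str.strip (ent orig r c) ≠ "R" then "  x  " else ent orig r c

def RowsOK (orig : List (List String)) : Prop :=
  ∀ r, r < orig.length → (orig.headD []).length ≤ (orig.getD r []).length

lemma getD_set_eq {α : Type} (l : List α) (i n : Nat) (a d : α) :
    (l.set i a).getD n d = if n = i ∧ i < l.length then a else l.getD n d := by
  simp only [List.getD_eq_getElem?_getD, List.getElem?_set]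
  split_ifs with h1 h2 h3 <;> simp_all

lemma mrep_refl (orig : List (List String)) : MRep orig (fun _ _ => false) orig := by
  refine ⟨rfl, fun _ => rfl, fun r c => by simp⟩

lemma mrep_congr {orig tab : List (List String)} {M M' : Nat → Nat → Bool}
    (h : ∀ r c, M r c = M' r c) (hR : MRep orig M tab) : MRep orig M' tab := by
  refine ⟨hR.1, hR.2.1, fun r c => by rw [← h r c]; exact hR.2.2 r c⟩

lemma rep_mark {orig tab : List (List String)} {M : Nat → Nat → Bool} {i j : Nat}
    (hR : MRep orig M tab) (hok : RowsOK orig)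
    (hi : i < orig.length) (hj : j < (orig.headD []).length) :
    MRep orig (fun r c => M r c || (decide (r = i) && decide (c = j))) (adicionar_marcacao i j tab) := by
  obtain ⟨hl, hrow, he⟩ := hR
  have hjrow : j < (tab.getD i []).length := by
    have := hok i hi; rw [hrow i]; omega
  have hitab : i < tab.length := by omega
  have hij := he i j
  unfold adicionar_marcacao
  by_cases hw : PySem.Str.strip ((tab.getD i []).getD j "") ≠ "R"
  · rw [if_pos hw]
    have hse : PySem.Str.strip (ent orig i j) ≠ "R" := by
      by_cases hc : M i j = true ∧ PySem.Str.strip (ent orig i j) ≠ "R"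
      · exact hc.2
      · rw [if_neg hc] at hij; rw [← hij]; exact hw
    refine ⟨by simpa using hl, ?_, ?_⟩
    · intro r
      rw [getD_set_eq]
      split_ifs with h1
      · rw [h1.1, List.length_set]; exact hrow i
      · exact hrow r
    · intro r c
      unfold ent
      rw [getD_set_eq]
      by_cases h1 : r = i ∧ i < tab.length
      · rw [if_pos h1]
        obtain ⟨rfl, -⟩ := h1
        rw [getD_set_eq]
        by_cases h2 : c = j ∧ j < (tab.getD r []).length
        · rw [if_pos h2]
          obtain ⟨rfl, -⟩ := h2
          simp [ent] at hse ⊢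
          simp [hse]
        · rw [if_neg h2]
          have hne : ¬ (c = j) := fun hcj => h2 ⟨hcj, hjrow⟩
          have hx := he r c
          unfold ent at hx
          rw [hx]
          simp [hne]
      · rw [if_neg h1]
        have hne : ¬ (r = i) := fun hri => h1 ⟨hri, hitab⟩
        have hx := he r c
        unfold ent at hx
        rw [hx]
        simp [hne]
  · rw [if_neg hw]
    rw [Ne, not_not] at hw
    have hre : PySem.Str.strip (ent orig i j) = "R" := by
      by_cases hc : M i j = true ∧ PySem.Str.strip (ent orig i j) ≠ "R"
      · rw [if_pos hc] at hij
        exfalso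
        have : PySem.Str.strip (ent tab i j) = "R" := hw
        rw [hij] at this
        revert this; decide
      · rw [if_neg hc] at hij
        have : PySem.Str.strip (ent tab i j) = "R" := hw
        rwa [hij] at this
    refine ⟨hl, hrow, ?_⟩
    intro r c
    rw [he r c]
    by_cases h1 : r = i ∧ c = j
    · obtain ⟨rfl, rfl⟩ := h1
      simp [hre]
    · have hm : (decide (r = i) && decide (c = j)) = false := by
        simp only [Bool.and_eq_false_iff, decide_eq_false_iff_not]
        by_cases hri : r = i
        · right; intro hcj; exact h1 ⟨hri, hcj⟩
        · left; exact hri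
      simp only [hm, Bool.or_false]

lemma rep_eq {orig s t : List (List String)} {M M' : Nat → Nat → Bool}
    (hs : MRep orig M s) (ht : MRep orig M' t) (h : ∀ r c, M r c = M' r c) : s = t := by
  obtain ⟨hl1, hr1, he1⟩ := hs
  obtain ⟨hl2, hr2, he2⟩ := ht
  have hl : s.length = t.length := by omega
  have hr : ∀ r, (s.getD r []).length = (t.getD r []).length := fun r => by
    rw [hr1 r, hr2 r]
  have he : ∀ r c, ent s r c = ent t r c := fun r c => by
    rw [he1 r c, he2 r c, h r c]
  apply List.ext_getElem hl
  intro r h1 h2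
  apply List.ext_getElem
  · have hx := hr r
    rwa [List.getD_eq_getElem s [] h1, List.getD_eq_getElem t [] h2] at hx
  · intro c hc1 hc2
    have hx := he r c
    unfold ent at hx
    rwa [List.getD_eq_getElem s [] h1, List.getD_eq_getElem t [] h2,
      List.getD_eq_getElem _ _ hc1, List.getD_eq_getElem _ _ hc2] at hx

lemma bool_ext {a b : Bool} (h : (a = true) ↔ (b = true)) : a = b := by
  cases a <;> cases b <;> simp_all

-- inner loop of A's row/column double scan, at row i
lemma rep_gridInner {orig : List (List String)} (hok : RowsOK orig) (iq jq i : Nat)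
    (hi : i < orig.length) :
    ∀ (n : Nat), n ≤ (orig.headD []).length → ∀ {tab : List (List String)} {M : Nat → Nat → Bool},
    MRep orig M tab →
    MRep orig (fun r c => M r c ||
        (decide (r = i) && decide (c < n) && (decide (i = iq) || decide (c = jq))))
      ((List.range n).foldl (fun t j => if i = iq ∨ j = jq then adicionar_marcacao i j t else t) tab) := by
  intro n
  induction n with
  | zero =>
    intro _ tab M hR
    simp only [List.range_zero, List.foldl_nil]
    refine mrep_congr (fun r c => ?_) hR
    apply bool_ext
    by_cases hM : M r c = true
    · simp [hM, -List.headD_eq_head?_getD]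
    · simp [hM, -List.headD_eq_head?_getD]
      try omega
  | succ k ih =>
    intro hn tab M hR
    rw [List.range_succ, List.foldl_append, List.foldl_cons, List.foldl_nil]
    have h1 := ih (by omega) hR
    by_cases hg : i = iq ∨ k = jq
    · rw [if_pos hg]
      have h2 := rep_mark h1 hok hi (j := k) (by omega)
      refine mrep_congr (fun r c => ?_) h2
      apply bool_ext
      by_cases hM : M r c = true
      · simp [hM, -List.headD_eq_head?_getD]
      · simp [hM, -List.headD_eq_head?_getD]
        try omega
    · rw [if_neg hg]
      refine mrep_congr (fun r c => ?_) h1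
      apply bool_ext
      by_cases hM : M r c = true
      · simp [hM, -List.headD_eq_head?_getD]
      · simp [hM, -List.headD_eq_head?_getD]
        try omega

-- A's row/column double loop
lemma rep_grid {orig : List (List String)} (hok : RowsOK orig) (iq jq : Nat) :
    ∀ (n : Nat), n ≤ orig.length → ∀ {tab : List (List String)} {M : Nat → Nat → Bool},
    MRep orig M tab →
    MRep orig (fun r c => M r c ||
        (decide (r < n) && decide (c < (orig.headD []).length) && (decide (r = iq) || decide (c = jq))))
      ((List.range n).foldl (fun t i =>
        (List.range (orig.headD []).length).foldl (fun t j =>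
          if i = iq ∨ j = jq then adicionar_marcacao i j t else t) t) tab) := by
  intro n
  induction n with
  | zero =>
    intro _ tab M hR
    simp only [List.range_zero, List.foldl_nil]
    refine mrep_congr (fun r c => ?_) hR
    apply bool_ext
    by_cases hM : M r c = true
    · simp [hM, -List.headD_eq_head?_getD]
    · simp [hM, -List.headD_eq_head?_getD]
      try omega
  | succ k ih =>
    intro hn tab M hR
    rw [List.range_succ, List.foldl_append, List.foldl_cons, List.foldl_nil]
    have h1 := ih (by omega) hR
    have h2 := rep_gridInner hok iq jq k (by omega) (orig.headD []).length le_rfl h1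
    refine mrep_congr (fun r c => ?_) h2
    apply bool_ext
    by_cases hM : M r c = true
    · simp [hM, -List.headD_eq_head?_getD]
    · simp [hM, -List.headD_eq_head?_getD]
      try omega

-- A's descending-diagonal while loop
lemma rep_desc {orig : List (List String)} (hok : RowsOK orig) :
    ∀ (i j : Nat) {tab : List (List String)} {M : Nat → Nat → Bool}, MRep orig M tab →
    MRep orig (fun r c => M r c ||
        (decide ((r : Int) - c = (i : Int) - j) && decide (i ≤ r) && decide (r < orig.length)
          && decide (j ≤ c) && decide (c < (orig.headD []).length)))
      (descLoop orig.length (orig.headD []).length i j tab) := by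
  suffices H : ∀ (m i j : Nat) {tab : List (List String)} {M : Nat → Nat → Bool},
      orig.length - i ≤ m → MRep orig M tab →
      MRep orig (fun r c => M r c ||
        (decide ((r : Int) - c = (i : Int) - j) && decide (i ≤ r) && decide (r < orig.length)
          && decide (j ≤ c) && decide (c < (orig.headD []).length)))
      (descLoop orig.length (orig.headD []).length i j tab) by
    intro i j tab M hR
    exact H (orig.length - i) i j le_rfl hR
  intro m
  induction m with
  | zero =>
    intro i j tab M hm hR
    rw [descLoop, if_neg (by omega)]
    refine mrep_congr (fun r c => ?_) hR
    apply bool_ext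
    by_cases hM : M r c = true
    · simp [hM, -List.headD_eq_head?_getD]
    · simp [hM, -List.headD_eq_head?_getD]
      try omega
  | succ k ih =>
    intro i j tab M hm hR
    rw [descLoop]
    by_cases h : i < orig.length ∧ j < (orig.headD []).length
    · rw [if_pos h]
      have h1 := rep_mark hR hok h.1 h.2
      have h2 := ih (i + 1) (j + 1) (by omega) h1
      refine mrep_congr (fun r c => ?_) h2
      apply bool_ext
      by_cases hM : M r c = true
      · simp [hM, -List.headD_eq_head?_getD]
      · simp [hM, -List.headD_eq_head?_getD]
        try omega
    · rw [if_neg h]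
      refine mrep_congr (fun r c => ?_) hR
      apply bool_ext
      by_cases hM : M r c = true
      · simp [hM, -List.headD_eq_head?_getD]
      · simp [hM, -List.headD_eq_head?_getD]
        try omega

-- A's ascending-diagonal while loop
lemma rep_asce {orig : List (List String)} (hok : RowsOK orig) :
    ∀ (j : Nat) (i : Int), i < (orig.length : Int) →
    ∀ {tab : List (List String)} {M : Nat → Nat → Bool}, MRep orig M tab →
    MRep orig (fun r c => M r c ||
        (decide ((r : Int) + c = i + j) && decide ((r : Int) ≤ i) && decide (j ≤ c)
          && decide (c < (orig.headD []).length)))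
      (asceLoop orig.length (orig.headD []).length i j tab) := by
  suffices H : ∀ (m : Nat) (j : Nat) (i : Int), i < (orig.length : Int) →
      ∀ {tab : List (List String)} {M : Nat → Nat → Bool},
      (orig.headD []).length - j ≤ m → MRep orig M tab →
      MRep orig (fun r c => M r c ||
        (decide ((r : Int) + c = i + j) && decide ((r : Int) ≤ i) && decide (j ≤ c)
          && decide (c < (orig.headD []).length)))
      (asceLoop orig.length (orig.headD []).length i j tab) by
    intro j i hi tab M hR
    exact H ((orig.headD []).length - j) j i hi le_rfl hR
  intro m
  induction m with
  | zero =>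
    intro j i hi tab M hm hR
    rw [asceLoop, if_neg (by omega)]
    refine mrep_congr (fun r c => ?_) hR
    apply bool_ext
    by_cases hM : M r c = true
    · simp [hM, -List.headD_eq_head?_getD]
    · simp [hM, -List.headD_eq_head?_getD]
      try omega
  | succ k ih =>
    intro j i hi tab M hm hR
    rw [asceLoop]
    by_cases h : 0 ≤ i ∧ j < (orig.headD []).length
    · rw [if_pos h]
      have hlt : i.toNat < orig.length := by omega
      have h1 := rep_mark hR hok hlt h.2
      have h2 := ih (j + 1) (i - 1) (by omega) (by omega) h1
      refine mrep_congr (fun r c => ?_) h2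
      apply bool_ext
      by_cases hM : M r c = true
      · simp [hM, -List.headD_eq_head?_getD]
      · simp [hM, -List.headD_eq_head?_getD]
        try omega
    · rw [if_neg h]
      refine mrep_congr (fun r c => ?_) hR
      apply bool_ext
      by_cases hM : M r c = true
      · simp [hM, -List.headD_eq_head?_getD]
      · simp [hM, -List.headD_eq_head?_getD]
        try omega

-- B's row loop
lemma rep_row {orig : List (List String)} (hok : RowsOK orig) (qi : Nat) (hqi : qi < orig.length) :
    ∀ (n : Nat), n ≤ (orig.headD []).length → ∀ {tab : List (List String)} {M : Nat → Nat → Bool},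
    MRep orig M tab →
    MRep orig (fun r c => M r c || (decide (r = qi) && decide (c < n)))
      ((List.range n).foldl (fun t c => marcarB qi c t) tab) := by
  have hmb : marcarB = adicionar_marcacao := rfl
  rw [hmb]
  intro n
  induction n with
  | zero =>
    intro _ tab M hR
    simp only [List.range_zero, List.foldl_nil]
    refine mrep_congr (fun r c => ?_) hR
    apply bool_ext
    by_cases hM : M r c = true
    · simp [hM, -List.headD_eq_head?_getD]
    · simp [hM, -List.headD_eq_head?_getD]
      try omega
  | succ k ih =>
    intro hn tab M hR
    rw [List.range_succ, List.foldl_append, List.foldl_cons, List.foldl_nil]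
    have h1 := ih (by omega) hR
    have h2 := rep_mark h1 hok hqi (j := k) (by omega)
    refine mrep_congr (fun r c => ?_) h2
    apply bool_ext
    by_cases hM : M r c = true
    · simp [hM, -List.headD_eq_head?_getD]
    · simp [hM, -List.headD_eq_head?_getD]
      try omega

-- B's column loop
lemma rep_col {orig : List (List String)} (hok : RowsOK orig) (qj : Nat)
    (hqj : qj < (orig.headD []).length) :
    ∀ (n : Nat), n ≤ orig.length → ∀ {tab : List (List String)} {M : Nat → Nat → Bool},
    MRep orig M tab →
    MRep orig (fun r c => M r c || (decide (r < n) && decide (c = qj)))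
      ((List.range n).foldl (fun t r => marcarB r qj t) tab) := by
  have hmb : marcarB = adicionar_marcacao := rfl
  rw [hmb]
  intro n
  induction n with
  | zero =>
    intro _ tab M hR
    simp only [List.range_zero, List.foldl_nil]
    refine mrep_congr (fun r c => ?_) hR
    apply bool_ext
    by_cases hM : M r c = true
    · simp [hM, -List.headD_eq_head?_getD]
    · simp [hM, -List.headD_eq_head?_getD]
      try omega
  | succ k ih =>
    intro hn tab M hR
    rw [List.range_succ, List.foldl_append, List.foldl_cons, List.foldl_nil]
    have h1 := ih (by omega) hR
    have h2 := rep_mark h1 hok (i := k) (by omega) hqj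
    refine mrep_congr (fun r c => ?_) h2
    apply bool_ext
    by_cases hM : M r c = true
    · simp [hM, -List.headD_eq_head?_getD]
    · simp [hM, -List.headD_eq_head?_getD]
      try omega

-- B's diagonal loop
lemma rep_diag {orig : List (List String)} (hok : RowsOK orig) (qi qj : Nat) :
    ∀ (n : Nat), n ≤ orig.length → ∀ {tab : List (List String)} {M : Nat → Nat → Bool},
    MRep orig M tab →
    MRep orig (fun r c => M r c ||
        (decide (r < n) && decide (c < (orig.headD []).length)
          && (decide ((r : Int) - c = (qi : Int) - qj) || decide ((r : Int) + c = (qi : Int) + qj))))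
      ((List.range n).foldl (fun (t : List (List String)) (r : Nat) =>
        let c1 : Int := (r : Int) + qj - qi
        let t' := if 0 ≤ c1 ∧ c1 < ((orig.headD []).length : Int) then marcarB r c1.toNat t else t
        let c2 : Int := (qi : Int) + qj - r
        if 0 ≤ c2 ∧ c2 < ((orig.headD []).length : Int) then marcarB r c2.toNat t' else t') tab) := by
  have hmb : marcarB = adicionar_marcacao := rfl
  rw [hmb]
  intro n
  induction n with
  | zero =>
    intro _ tab M hR
    simp only [List.range_zero, List.foldl_nil]
    refine mrep_congr (fun r c => ?_) hR
    apply bool_ext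
    by_cases hM : M r c = true
    · simp [hM, -List.headD_eq_head?_getD]
    · simp [hM, -List.headD_eq_head?_getD]
      try omega
  | succ k ih =>
    intro hn tab M hR
    rw [List.range_succ, List.foldl_append, List.foldl_cons, List.foldl_nil]
    have h1 := ih (by omega) hR
    dsimp only
    by_cases hc1 : (0 : Int) ≤ (k : Int) + qj - qi ∧ (k : Int) + qj - qi < ((orig.headD []).length : Int)
    · rw [if_pos hc1]
      have h2 := rep_mark h1 hok (i := k) (j := ((k : Int) + qj - qi).toNat) (by omega) (by omega)
      by_cases hc2 : (0 : Int) ≤ (qi : Int) + qj - k ∧ (qi : Int) + qj - k < ((orig.headD []).length : Int)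
      · rw [if_pos hc2]
        have h3 := rep_mark h2 hok (i := k) (j := ((qi : Int) + qj - k).toNat) (by omega) (by omega)
        refine mrep_congr (fun r c => ?_) h3
        apply bool_ext
        by_cases hM : M r c = true
        · simp [hM, -List.headD_eq_head?_getD]
        · simp [hM, -List.headD_eq_head?_getD]
          try omega
      · rw [if_neg hc2]
        refine mrep_congr (fun r c => ?_) h2
        apply bool_ext
        by_cases hM : M r c = true
        · simp [hM, -List.headD_eq_head?_getD]
        · simp [hM, -List.headD_eq_head?_getD]
          try omega
    · rw [if_neg hc1]
      by_cases hc2 : (0 : Int) ≤ (qi : Int) + qj - k ∧ (qi : Int) + qj - k < ((orig.headD []).length : Int)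
      · rw [if_pos hc2]
        have h2 := rep_mark h1 hok (i := k) (j := ((qi : Int) + qj - k).toNat) (by omega) (by omega)
        refine mrep_congr (fun r c => ?_) h2
        apply bool_ext
        by_cases hM : M r c = true
        · simp [hM, -List.headD_eq_head?_getD]
        · simp [hM, -List.headD_eq_head?_getD]
          try omega
      · rw [if_neg hc2]
        refine mrep_congr (fun r c => ?_) h1
        apply bool_ext
        by_cases hM : M r c = true
        · simp [hM, -List.headD_eq_head?_getD]
        · simp [hM, -List.headD_eq_head?_getD]
          try omega

-- queen-scan bounds
lemma queen_bounds (tab : List (List String)) (h0 : 0 < tab.length) :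
    (selecionar_coordenadas_rainha tab).1 < tab.length ∧
    ((tab.headD []).length = 0 → (selecionar_coordenadas_rainha tab).2 = 0) ∧
    (0 < (tab.headD []).length → (selecionar_coordenadas_rainha tab).2 < (tab.headD []).length) := by
  unfold selecionar_coordenadas_rainha
  have inner : ∀ (i : Nat) (l : List Nat) (st : Nat × Nat),
      (∀ j ∈ l, j < (tab.headD []).length) → i < tab.length →
      st.1 < tab.length → ((tab.headD []).length = 0 → st.2 = 0) →
      (0 < (tab.headD []).length → st.2 < (tab.headD []).length) →
      (l.foldl (fun st j =>
        if PySem.Str.strip ((tab.getD i []).getD j "") = "R" then (i, j) else st) st).1 < tab.length ∧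
      ((tab.headD []).length = 0 → (l.foldl (fun st j =>
        if PySem.Str.strip ((tab.getD i []).getD j "") = "R" then (i, j) else st) st).2 = 0) ∧
      (0 < (tab.headD []).length → (l.foldl (fun st j =>
        if PySem.Str.strip ((tab.getD i []).getD j "") = "R" then (i, j) else st) st).2 < (tab.headD []).length) := by
    intro i l
    induction l with
    | nil => intro st _ _ h1 h2 h3; exact ⟨h1, h2, h3⟩
    | cons x xs ih =>
      intro st hmem hi h1 h2 h3
      rw [List.foldl_cons]
      by_cases hx : PySem.Str.strip ((tab.getD i []).getD x "") = "R"
      · rw [if_pos hx]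
        refine ih _ (fun j hj => hmem j (List.mem_cons_of_mem _ hj)) hi hi ?_ ?_
        · intro h0; exfalso; have := hmem x List.mem_cons_self; omega
        · intro _; exact hmem x List.mem_cons_self
      · rw [if_neg hx]
        exact ih _ (fun j hj => hmem j (List.mem_cons_of_mem _ hj)) hi h1 h2 h3
  have outer : ∀ (l : List Nat) (st : Nat × Nat),
      (∀ i ∈ l, i < tab.length) →
      st.1 < tab.length → ((tab.headD []).length = 0 → st.2 = 0) →
      (0 < (tab.headD []).length → st.2 < (tab.headD []).length) →
      (l.foldl (fun st i =>
        (List.range (tab.headD []).length).foldl (fun st j =>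
          if PySem.Str.strip ((tab.getD i []).getD j "") = "R" then (i, j) else st) st) st).1 < tab.length ∧
      ((tab.headD []).length = 0 → (l.foldl (fun st i =>
        (List.range (tab.headD []).length).foldl (fun st j =>
          if PySem.Str.strip ((tab.getD i []).getD j "") = "R" then (i, j) else st) st) st).2 = 0) ∧
      (0 < (tab.headD []).length → (l.foldl (fun st i =>
        (List.range (tab.headD []).length).foldl (fun st j =>
          if PySem.Str.strip ((tab.getD i []).getD j "") = "R" then (i, j) else st) st) st).2 < (tab.headD []).length) := by
    intro l
    induction l with
    | nil => intro st _ h1 h2 h3; exact ⟨h1, h2, h3⟩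
    | cons x xs ih =>
      intro st hmem h1 h2 h3
      rw [List.foldl_cons]
      have hx : x < tab.length := hmem x List.mem_cons_self
      have hstep := inner x (List.range (tab.headD []).length) st
        (fun j hj => List.mem_range.mp hj) hx h1 h2 h3
      exact ih _ (fun i hi => hmem i (List.mem_cons_of_mem _ hi)) hstep.1 hstep.2.1 hstep.2.2
  exact outer (List.range tab.length) (0, 0) (fun i hi => List.mem_range.mp hi) h0
    (fun _ => rfl) (fun h => h)

lemma descOrigin_spec (i j : Nat) :
    ((diagDescOrigin i j).1 : Int) - (diagDescOrigin i j).2 = (i : Int) - j ∧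
    (diagDescOrigin i j).1 ≤ i ∧ (diagDescOrigin i j).2 ≤ j ∧
    ((diagDescOrigin i j).1 = 0 ∨ (diagDescOrigin i j).2 = 0) := by
  fun_induction diagDescOrigin i j with
  | case1 i j h ih => omega
  | case2 i j h => dsimp only; omega

lemma asceOrigin_spec (rows i j : Nat) (hi : i < rows) :
    (diagAsceOrigin rows i j).1 + (diagAsceOrigin rows i j).2 = i + j ∧
    (diagAsceOrigin rows i j).1 < rows ∧ (diagAsceOrigin rows i j).2 ≤ j ∧
    ((diagAsceOrigin rows i j).1 = rows - 1 ∨ (diagAsceOrigin rows i j).2 = 0) := by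
  fun_induction diagAsceOrigin rows i j with
  | case1 i j h ih => omega
  | case2 i j h => dsimp only; omega

-- ===== VERDICT (by name: the statement is the Claim_ definition above) =====
theorem marque_atacadas_spec : Claim_equal_marque_atacadas := by
  intro tab hdom hpre
  obtain ⟨hne, hrows⟩ := hpre
  have h0 : 0 < tab.length := by
    cases tab with
    | nil => exact absurd rfl hne
    | cons a l => simp
  have hok : RowsOK tab := by
    intro r hr
    have hmem : tab.getD r [] ∈ tab := by
      rw [List.getD_eq_getElem tab [] hr]
      exact List.getElem_mem hr
    exact hrows _ hmem
  unfold Spec_marque_atacadas marque_atacadas marque_atacadas_alt selecionar_coordenadas_diagonais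
  have hfq : findQueenB tab = selecionar_coordenadas_rainha tab := rfl
  rw [hfq]
  have hq := queen_bounds tab h0
  set q := selecionar_coordenadas_rainha tab with hqdef
  dsimp only
  have hd := descOrigin_spec q.1 q.2
  have ha := asceOrigin_spec tab.length q.1 q.2 hq.1
  set dd := diagDescOrigin q.1 q.2 with hdddef
  set aa := diagAsceOrigin tab.length q.1 q.2 with haadef
  have m1 := rep_grid hok q.1 q.2 tab.length le_rfl (mrep_refl tab)
  have m2 := rep_desc hok dd.1 dd.2 m1
  have hlt : (aa.1 : Int) < (tab.length : Int) := by exact_mod_cast ha.2.1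
  have m3 := rep_asce hok aa.2 (aa.1 : Int) hlt m2
  clear_value q dd aa
  by_cases hc : (tab.headD []).length = 0
  · rw [if_pos hc]
    refine rep_eq m3 (mrep_refl tab) (fun r c => ?_)
    apply bool_ext
    have hc' : (tab.head?.getD []).length = 0 := by
      rw [← List.headD_eq_head?_getD]; exact hc
    simp [hc']
  · rw [if_neg hc]
    have hcols : 0 < (tab.headD []).length := Nat.pos_of_ne_zero hc
    have hqj : q.2 < (tab.headD []).length := hq.2.2 hcols
    have b1 := rep_row hok q.1 hq.1 (tab.headD []).length le_rfl (mrep_refl tab)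
    have b2 := rep_col hok q.2 hqj tab.length le_rfl b1
    have b3 := rep_diag hok q.1 q.2 tab.length le_rfl b2
    refine rep_eq m3 b3 (fun r c => ?_)
    apply bool_ext
    simp only [Bool.or_eq_true, Bool.and_eq_true, decide_eq_true_eq, Bool.false_eq_true,
      false_or]
    obtain ⟨hd1, hd2, hd3, hd4⟩ := hd
    obtain ⟨ha1, ha2, ha3, ha4⟩ := ha
    omega
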